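-- pv_equiv track=rewrite | github.com/mattfeng6/leetcode | array/2038_remove_colored_pieces_if_both_neighbors_are_the_same_color.py | winnerOfGame
-- ===== SOURCE A (Python) =====
-- def winnerOfGame(colors: str) -> bool:
--
--     # Special Situation
--     if len(colors) < 3: return False
--
--     countA = countB = 0
--     for i in range(1, len(colors)-1):
--         if colors[i] == 'A' and colors[i-1] == 'A' and colors[i+1] == 'A':
--             countA += 1
--         if colors[i] == 'B' and colors[i-1] == 'B' and colors[i+1] == 'B':
--             countB += 1
--
--     return countA > countB
-- ===== SOURCE B (Python) =====
-- def winnerOfGame(colors: str) -> bool: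
--     # One pass tracking run lengths: a position counts for its color
--     # exactly when it is at least the 3rd character of its current run.
--     countA = countB = 0
--     prev = ''
--     run = 0
--     for ch in colors:
--         if ch == prev:
--             run += 1
--         else:
--             prev = ch
--             run = 1
--         if run > 2:
--             if ch == 'A':
--                 countA += 1
--             elif ch == 'B':
--                 countB += 1
--     return countA > countB
-- ===== Notes on version B (the rewrite author's own statement) =====
-- stated objective: idiomatic
-- what changed: Replaced the index-based three-wide window scan (with its explicit len<3 guard) by a single run-length pass: track the current run's color and length and count every position that is at least the 3rd of its run.
import Mathlib
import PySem

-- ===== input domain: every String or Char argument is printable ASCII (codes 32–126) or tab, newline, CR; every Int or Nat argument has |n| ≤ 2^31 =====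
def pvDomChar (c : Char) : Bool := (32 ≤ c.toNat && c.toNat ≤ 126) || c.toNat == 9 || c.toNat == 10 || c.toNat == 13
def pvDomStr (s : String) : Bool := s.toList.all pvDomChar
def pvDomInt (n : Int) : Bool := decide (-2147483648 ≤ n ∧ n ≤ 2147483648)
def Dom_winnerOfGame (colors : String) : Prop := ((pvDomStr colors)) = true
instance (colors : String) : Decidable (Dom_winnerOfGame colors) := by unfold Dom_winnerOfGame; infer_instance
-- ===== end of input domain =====

-- B replaces A's index-window scan by a single run-length pass (idiomatic one-pass scan, same O(n) cost).

-- ===== PORT A =====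
-- body of A's for-loop: two sequential ifs reading colors[i], colors[i-1], colors[i+1]
def winnerStep (cs : List Char) (ab : Int × Int) (i : Int) : Int × Int :=
  let ab1 := if PySem.List.pyGetD cs i ' ' = 'A' ∧ PySem.List.pyGetD cs (i-1) ' ' = 'A' ∧ PySem.List.pyGetD cs (i+1) ' ' = 'A'
             then (ab.1 + 1, ab.2) else ab
  if PySem.List.pyGetD cs i ' ' = 'B' ∧ PySem.List.pyGetD cs (i-1) ' ' = 'B' ∧ PySem.List.pyGetD cs (i+1) ' ' = 'B'
  then (ab1.1, ab1.2 + 1) else ab1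

def winnerOfGame (colors : String) : Bool :=
  let cs := colors.toList
  if cs.length < 3 then false
  else
    let r := (PySem.List.pyRange 1 ((cs.length : Int) - 1) 1).foldl (winnerStep cs) (0, 0)
    decide (r.1 > r.2)

-- ===== PORT B =====
-- state (prev, run, countA, countB); Python's '' sentinel for prev is ported as none
def altStep (s : Option Char × Int × Int × Int) (ch : Char) : Option Char × Int × Int × Int :=
  let (prev, run, cA, cB) := s
  let (prev, run) := if some ch = prev then (prev, run + 1) else (some ch, (1 : Int))
  let (cA, cB) := if run > 2 then
      (if ch = 'A' then (cA + 1, cB) else if ch = 'B' then (cA, cB + 1) else (cA, cB))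
    else (cA, cB)
  (prev, run, cA, cB)

def winnerOfGame_alt (colors : String) : Bool :=
  let fin := colors.toList.foldl altStep (none, 0, 0, 0)
  decide (fin.2.2.1 > fin.2.2.2)

-- ===== PRECONDITION & SPEC =====
def Spec_winnerOfGame (colors : String) (out : Bool) : Prop := out = winnerOfGame_alt colors
instance (colors : String) (out : Bool) : Decidable (Spec_winnerOfGame colors out) := by unfold Spec_winnerOfGame; infer_instance

-- ===== CLAIM (what is proved, stated in full; the proofs are below) =====
def Claim_equal_winnerOfGame : Prop := ∀ (colors : String), Dom_winnerOfGame colors → Spec_winnerOfGame colors (winnerOfGame colors)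

-- ===== LEMMAS AND PROOFS =====

-- indicator of a monochromatic window (argument order matches A's tests: middle, left, right)
def ind (ch a b c : Char) : Int := if b = ch ∧ a = ch ∧ c = ch then 1 else 0

-- number of length-3 monochromatic windows of colour ch
def tri (ch : Char) : List Char → Int
  | a :: b :: c :: rest => ind ch a b c + tri ch (b :: c :: rest)
  | _ => 0

-- contribution of a finished run of length len of colour c to the ch-count
def already (ch c : Char) (len : Nat) : Int := if ch = c ∧ 3 ≤ len then (len : Int) - 2 else 0

-- A's loop body with the three window characters passed directly
def step3 (a b c : Char) (ab : Int × Int) : Int × Int :=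
  let ab1 := if b = 'A' ∧ a = 'A' ∧ c = 'A' then (ab.1 + 1, ab.2) else ab
  if b = 'B' ∧ a = 'B' ∧ c = 'B' then (ab1.1, ab1.2 + 1) else ab1

theorem tri_cons3 (ch a b c : Char) (rest : List Char) :
    tri ch (a :: b :: c :: rest) = ind ch a b c + tri ch (b :: c :: rest) := rfl

theorem step3_eq (a b c : Char) (ab : Int × Int) :
    step3 a b c ab = (ab.1 + ind 'A' a b c, ab.2 + ind 'B' a b c) := by
  simp only [step3, ind]
  split_ifs <;> simp_all

theorem winnerStep_cast (cs : List Char) (ab : Int × Int) (k : Nat) :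
    winnerStep cs ab (1 + (k : Int)) =
      step3 (cs.getD k ' ') (cs.getD (k+1) ' ') (cs.getD (k+2) ' ') ab := by
  have g0 : PySem.List.pyGetD cs (1 + (k : Int) - 1) ' ' = cs.getD k ' ' := by
    rw [show (1 : Int) + (k : Int) - 1 = ((k : Nat) : Int) by omega, PySem.List.pyGetD_natCast]
  have g1 : PySem.List.pyGetD cs (1 + (k : Int)) ' ' = cs.getD (k+1) ' ' := by
    rw [show (1 : Int) + (k : Int) = ((k + 1 : Nat) : Int) by push_cast; ring, PySem.List.pyGetD_natCast]
  have g2 : PySem.List.pyGetD cs (1 + (k : Int) + 1) ' ' = cs.getD (k+2) ' ' := by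
    rw [show (1 : Int) + (k : Int) + 1 = ((k + 2 : Nat) : Int) by push_cast; ring, PySem.List.pyGetD_natCast]
  simp only [winnerStep, step3, g0, g1, g2]

theorem tri_short (ch : Char) (cs : List Char) (h : cs.length < 3) : tri ch cs = 0 := by
  match cs with
  | [] => rfl
  | [_] => rfl
  | [_, _] => rfl
  | _ :: _ :: _ :: _ => simp at h; omega

theorem tri_replicate (ch c : Char) : ∀ len : Nat,
    tri ch (List.replicate len c) = already ch c len
  | 0 => by simp [tri, already]
  | 1 => by simp [tri, already]
  | 2 => by simp [List.replicate, tri, already]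
  | (m+3) => by
    have h : List.replicate (m+3) c = c :: c :: c :: List.replicate m c := by
      simp [List.replicate]
    have h2 : List.replicate (m+2) c = c :: c :: List.replicate m c := by
      simp [List.replicate]
    have ih := tri_replicate ch c (m+2)
    rw [h, tri_cons3, ← h2, ih]
    simp only [ind, already]
    by_cases hc : ch = c
    · subst hc
      simp only [and_self, if_true, true_and]
      split_ifs <;> push_cast <;> omega
    · have hc' : ¬ c = ch := fun h => hc h.symm
      simp [hc, hc']

theorem tri_boundary (ch c x : Char) (xs : List Char) (hx : x ≠ c) : ∀ m : Nat,
    tri ch (List.replicate (m + 1) c ++ x :: xs) = already ch c (m + 1) + tri ch (x :: xs)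
  | 0 => by
    match xs with
    | [] => simp [tri, already]
    | y :: ys =>
      simp only [List.replicate, List.cons_append, List.nil_append, tri_cons3, ind, already]
      have e1 : ¬ (x = ch ∧ c = ch ∧ y = ch) := fun ⟨h1, h2, _⟩ => hx (h1.trans h2.symm)
      have e2 : ¬ (ch = c ∧ 3 ≤ 0 + 1) := by omega
      simp [e1]
  | 1 => by
    have h : List.replicate 2 c ++ x :: xs = c :: c :: x :: xs := by simp [List.replicate]
    have ih := tri_boundary ch c x xs hx 0
    have h0 : List.replicate 1 c ++ x :: xs = c :: x :: xs := by simp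
    rw [h, tri_cons3]
    rw [h0] at ih
    rw [ih]
    have e1 : ¬ (c = ch ∧ c = ch ∧ x = ch) := fun ⟨h1, _, h3⟩ => hx (h3.trans h1.symm)
    have e2 : ¬ (ch = c ∧ 3 ≤ 0 + 1) := by omega
    have e3 : ¬ (ch = c ∧ 3 ≤ 1 + 1) := by omega
    simp [ind, already, e1]
  | (k+2) => by
    have h : List.replicate (k+3) c ++ x :: xs = c :: c :: c :: (List.replicate k c ++ x :: xs) := by
      simp [List.replicate]
    have h2 : List.replicate (k+2) c ++ x :: xs = c :: c :: (List.replicate k c ++ x :: xs) := by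
      simp [List.replicate]
    have ih := tri_boundary ch c x xs hx (k+1)
    rw [show k+2+1 = k+3 by omega] at *
    rw [h, tri_cons3, ← h2, ih]
    simp only [ind, already]
    by_cases hc : ch = c
    · subst hc
      simp only [and_self, if_true, true_and]
      split_ifs <;> push_cast <;> omega
    · have hc' : ¬ c = ch := fun h => hc h.symm
      simp [hc, hc']

theorem foldRange (cs : List Char) : ∀ init : Int × Int,
    (List.range (cs.length - 2)).foldl
      (fun ab k => step3 (cs.getD k ' ') (cs.getD (k+1) ' ') (cs.getD (k+2) ' ') ab) init
    = (init.1 + tri 'A' cs, init.2 + tri 'B' cs) := by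
  induction cs with
  | nil => intro init; obtain ⟨u, v⟩ := init; simp [tri]
  | cons a t ih =>
    intro init
    match t, ih with
    | [], _ => obtain ⟨u, v⟩ := init; simp [tri]
    | [b], _ => obtain ⟨u, v⟩ := init; simp [tri]
    | b :: c :: t'', ih =>
      have hlen : (a :: b :: c :: t'').length - 2 = t''.length + 1 := by simp
      rw [hlen, List.range_succ_eq_map, List.foldl_cons, List.foldl_map]
      have hbody : ∀ (ab : Int × Int) (k : Nat),
          step3 ((a :: b :: c :: t'').getD (Nat.succ k) ' ')
                ((a :: b :: c :: t'').getD (Nat.succ k + 1) ' ')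
                ((a :: b :: c :: t'').getD (Nat.succ k + 2) ' ') ab
          = step3 ((b :: c :: t'').getD k ' ') ((b :: c :: t'').getD (k+1) ' ')
                  ((b :: c :: t'').getD (k+2) ' ') ab := by
        intro ab k
        have q1 : (a :: b :: c :: t'').getD (Nat.succ k) ' ' = (b :: c :: t'').getD k ' ' := by
          rw [show Nat.succ k = k + 1 from rfl, List.getD_cons_succ]
        have q2 : (a :: b :: c :: t'').getD (Nat.succ k + 1) ' ' = (b :: c :: t'').getD (k+1) ' ' := by
          rw [show Nat.succ k + 1 = (k + 1) + 1 from rfl, List.getD_cons_succ]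
        have q3 : (a :: b :: c :: t'').getD (Nat.succ k + 2) ' ' = (b :: c :: t'').getD (k+2) ' ' := by
          rw [show Nat.succ k + 2 = (k + 2) + 1 by omega, List.getD_cons_succ]
        rw [q1, q2, q3]
      simp only [hbody]
      have ihx := ih (step3 ((a :: b :: c :: t'').getD 0 ' ')
        ((a :: b :: c :: t'').getD (0+1) ' ') ((a :: b :: c :: t'').getD (0+2) ' ') init)
      rw [show (b :: c :: t'').length - 2 = t''.length by simp] at ihx
      rw [ihx]
      have ga : (a :: b :: c :: t'').getD 0 ' ' = a := rfl
      have gb : (a :: b :: c :: t'').getD (0+1) ' ' = b := rfl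
      have gc : (a :: b :: c :: t'').getD (0+2) ' ' = c := rfl
      rw [ga, gb, gc, step3_eq, tri_cons3 'A', tri_cons3 'B']
      simp only [Prod.mk.injEq]
      constructor <;> dsimp <;> ring

theorem altFold : ∀ (rest : List Char) (c : Char) (len : Nat) (cA cB : Int), 1 ≤ len →
    (rest.foldl altStep (some c, (len : Int), cA, cB)).2.2
      = (cA + tri 'A' (List.replicate len c ++ rest) - already 'A' c len,
         cB + tri 'B' (List.replicate len c ++ rest) - already 'B' c len) := by
  intro rest
  induction rest with
  | nil =>
    intro c len cA cB _
    simp [tri_replicate, already]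
  | cons x xs ih =>
    intro c len cA cB hlen
    by_cases hxc : x = c
    · subst hxc
      have hstep : altStep (some x, (len : Int), cA, cB) x =
          (some x, ((len + 1 : Nat) : Int),
           (if (len : Int) + 1 > 2 then
              (if x = 'A' then (cA + 1, cB) else if x = 'B' then (cA, cB + 1) else (cA, cB))
            else (cA, cB))) := by
        simp only [altStep]
        push_cast
        rfl
      rw [List.foldl_cons, hstep, ih x (len + 1) _ _ (by omega)]
      have hrep : List.replicate len x ++ x :: xs = List.replicate (len + 1) x ++ xs := by
        rw [List.replicate_succ']
        simp
      rw [hrep]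
      by_cases hxa : x = 'A'
      · subst hxa
        simp only [already, Prod.mk.injEq]
        norm_num
        split_ifs <;> simp_all <;> omega
      · by_cases hxb : x = 'B'
        · subst hxb
          simp only [already, Prod.mk.injEq]
          norm_num
          split_ifs <;> simp_all <;> omega
        · have n1 : ¬ (('A' : Char) = x) := fun h => hxa h.symm
          have n2 : ¬ (('B' : Char) = x) := fun h => hxb h.symm
          simp [already, n1, n2, hxa, hxb]
    · have hstep : altStep (some c, (len : Int), cA, cB) x = (some x, (1 : Int), cA, cB) := by
        have hne : ¬ (some x = some c) := by simpa using hxc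
        simp [altStep, hne]
      have ih1 := ih x 1 cA cB (le_refl 1)
      norm_num at ih1
      rw [List.foldl_cons, hstep, ih1]
      obtain ⟨m, rfl⟩ : ∃ m, len = m + 1 := ⟨len - 1, by omega⟩
      rw [tri_boundary 'A' c x xs hxc m, tri_boundary 'B' c x xs hxc m]
      have z1 : already 'A' x 1 = 0 := by simp [already]
      have z2 : already 'B' x 1 = 0 := by simp [already]
      rw [z1, z2] at ih1 ⊢
      simp only [Prod.mk.injEq]
      constructor <;> omega

theorem altFold_main (cs : List Char) :
    (cs.foldl altStep (none, 0, 0, 0)).2.2 = (tri 'A' cs, tri 'B' cs) := by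
  match cs with
  | [] => rfl
  | x :: xs =>
    have hstep : altStep (none, 0, 0, 0) x = (some x, (1 : Int), 0, 0) := by
      simp [altStep]
    have h := altFold xs x 1 0 0 (le_refl 1)
    norm_num at h
    rw [List.foldl_cons, hstep, h]
    simp [already]

-- ===== VERDICT (by name: the statement is the Claim_ definition above) =====
theorem winnerOfGame_spec : Claim_equal_winnerOfGame := by
  intro colors _
  unfold Spec_winnerOfGame
  simp only [winnerOfGame, winnerOfGame_alt]
  rw [altFold_main]
  by_cases hlen : colors.toList.length < 3
  · rw [if_pos hlen, tri_short 'A' _ hlen, tri_short 'B' _ hlen]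
    simp
  · rw [if_neg hlen]
    rw [PySem.List.pyRange_one,
        show ((colors.toList.length : Int) - 1 - 1).toNat = colors.toList.length - 2 by omega,
        List.foldl_map]
    simp only [winnerStep_cast]
    rw [foldRange colors.toList (0, 0)]
    simp
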